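-- pv_equiv track=rewrite | github.com/bbrks/ocado-ha | custom_components/ocado/utils.py | HeaderIndex
-- ===== SOURCE A (Python) =====
-- def HeaderIndex(string: str, receipt_list: list) -> int | None:
--     """Returns the first index of a header in a list and removes any other occurences from the list."""
--     count = receipt_list.count(string)
--     indices = []
--     if count == 0:
--         return None
--     index = 0
--     while count > 0:
--         index = receipt_list.index(string, index)
--         indices.append(index)
--         index += 1
--         count -= 1
--     first_index = indices.pop(0)
--     for i in range(len(indices)):
--         receipt_list.pop(indices[i])
--     return first_index
-- ===== SOURCE B (Python) =====
-- def HeaderIndex(string: str, receipt_list: list) -> int | None: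
--     """Return the first index of `string` in `receipt_list` (None if absent).
--
--     Return-value reimplementation: a single scan with enumerate. A also
--     mutates receipt_list (buggily, with shifted pops); B does not mutate."""
--     for i, line in enumerate(receipt_list):
--         if line == string:
--             return i
--     return None
-- ===== Notes on version B (the rewrite author's own statement) =====
-- stated objective: simpler
-- what changed: A counts occurrences, re-scans with repeated list.index, then pops the later occurrences at stale indices; B is one enumerate scan that returns the first matching index (return value only; B does not mutate the list).
-- crash fix: On lists where a later occurrence of the header sits close enough to the end that A's unshifted pop indices overrun the shrinking list, A raises IndexError while B returns the first index of the header. — e.g. on HeaderIndex("x", ["a", "x", "x", "x"]): A raises IndexError, B returns some 1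
import Mathlib
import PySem

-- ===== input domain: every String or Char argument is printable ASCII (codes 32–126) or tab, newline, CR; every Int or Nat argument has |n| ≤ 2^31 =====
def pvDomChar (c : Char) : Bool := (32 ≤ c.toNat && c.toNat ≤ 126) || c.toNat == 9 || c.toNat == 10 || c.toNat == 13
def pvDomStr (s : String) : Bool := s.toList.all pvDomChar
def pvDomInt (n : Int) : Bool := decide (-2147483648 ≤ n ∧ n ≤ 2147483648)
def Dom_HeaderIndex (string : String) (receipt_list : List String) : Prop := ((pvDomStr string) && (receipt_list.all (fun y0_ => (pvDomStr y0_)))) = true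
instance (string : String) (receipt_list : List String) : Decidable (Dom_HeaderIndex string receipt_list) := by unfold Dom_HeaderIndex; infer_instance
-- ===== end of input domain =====

-- B replaces A's count + repeated .index + shifted pops by one enumerate scan (simpler);
-- equivalence is about the RETURN value only: A also mutates receipt_list (buggily), B does not.

-- ===== PORT A =====
-- receipt_list.index(string, index): exact for 0 ≤ index (the loop only passes 0 and found+1)
def pvIndexA (l : List String) (s : String) (start : Int) : Option Int :=
  (PySem.List.index? (l.drop start.toNat) s).map (fun k => (k : Int) + start)

-- the `while count > 0` loop; `none` = the (unreachable) ValueError of list.index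
def pvLoopA (l : List String) (s : String) : Nat → Int → List Int → Option (List Int)
  | 0, _, indices => some indices
  | Nat.succ c, index, indices =>
    match pvIndexA l s index with
    | none => none
    | some i => pvLoopA l s c (i + 1) (indices ++ [i])

-- `for i in range(len(indices)): receipt_list.pop(indices[i])`; `none` = IndexError
def pvPopLoop : List String → List Int → Option (List String)
  | cur, [] => some cur
  | cur, i :: rest =>
    match PySem.List.pop? cur i with
    | none => none
    | some (_, cur') => pvPopLoop cur' rest

def HeaderIndex (string : String) (receipt_list : List String) : Option Int :=
  let count := PySem.List.count receipt_list string
  if count = 0 then none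
  else
    match pvLoopA receipt_list string count 0 [] with
    | none => none
    | some [] => none  -- indices.pop(0) on empty: IndexError (unreachable)
    | some (first :: rest) =>
      match pvPopLoop receipt_list rest with
      | none => none   -- receipt_list.pop(...) raised IndexError
      | some _ => some first

-- ===== PORT B =====
-- `for i, line in enumerate(receipt_list): if line == string: return i`
def pvFindB (s : String) : List String → Int → Option Int
  | [], _ => none
  | x :: xs, i => if x == s then some i else pvFindB s xs (i + 1)

def HeaderIndex_alt (string : String) (receipt_list : List String) : Option Int :=
  pvFindB string receipt_list 0

-- ===== PRECONDITION & SPEC =====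
-- Pre_ excludes exactly the inputs on which A RAISES IndexError: a non-first occurrence of
-- `string` at position j (j has t ≥ 1 earlier occurrences) with j + t past the list's length,
-- where A's unshifted pop indices overrun the list it has already shortened.
def Pre_HeaderIndex (string : String) (receipt_list : List String) : Prop :=
  ∀ j, j < receipt_list.length → receipt_list[j]! = string →
    1 ≤ List.count string (receipt_list.take j) →
    j + List.count string (receipt_list.take j) ≤ receipt_list.length

instance (string : String) (receipt_list : List String) : Decidable (Pre_HeaderIndex string receipt_list) := by
  unfold Pre_HeaderIndex; infer_instance

def pvWitness_HeaderIndex : String × List String := ("h", ["h", "a", "h", "b"])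

-- On the inputs Pre_ excludes, A raises IndexError from the shifted pops while B returns the
-- first index of `string`, the value A's docstring promises.
def Raises_HeaderIndex (string : String) (receipt_list : List String) : Prop :=
  ∃ j, j < receipt_list.length ∧ receipt_list[j]! = string ∧
    1 ≤ List.count string (receipt_list.take j) ∧
    j + List.count string (receipt_list.take j) > receipt_list.length

instance (string : String) (receipt_list : List String) : Decidable (Raises_HeaderIndex string receipt_list) := by
  unfold Raises_HeaderIndex; infer_instance

def pvRaiseWitness_HeaderIndex : String × List String := ("x", ["a", "x", "x", "x"])
def pvRaiseWitnessOut_HeaderIndex : Option Int := some 1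

def Spec_HeaderIndex (string : String) (receipt_list : List String) (out : Option Int) : Prop := out = HeaderIndex_alt string receipt_list
instance (string : String) (receipt_list : List String) (out : Option Int) : Decidable (Spec_HeaderIndex string receipt_list out) := by unfold Spec_HeaderIndex; infer_instance

-- ===== CLAIM (what is proved, stated in full; the proofs are below) =====
def Claim_equal_HeaderIndex : Prop := ∀ (string : String) (receipt_list : List String), Dom_HeaderIndex string receipt_list → Pre_HeaderIndex string receipt_list → Spec_HeaderIndex string receipt_list (HeaderIndex string receipt_list)

def Claim_raises_HeaderIndex : Prop := (∀ (string : String) (receipt_list : List String), Dom_HeaderIndex string receipt_list → Raises_HeaderIndex string receipt_list → ¬ Pre_HeaderIndex string receipt_list) ∧ (Dom_HeaderIndex (pvRaiseWitness_HeaderIndex.1) (pvRaiseWitness_HeaderIndex.2) ∧ Raises_HeaderIndex (pvRaiseWitness_HeaderIndex.1) (pvRaiseWitness_HeaderIndex.2) ∧ HeaderIndex_alt (pvRaiseWitness_HeaderIndex.1) (pvRaiseWitness_HeaderIndex.2) = pvRaiseWitnessOut_HeaderIndex)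

-- ===== LEMMAS AND PROOFS =====

-- the 0-based positions of the occurrences of s in the list, counting from d
def pvPositions (s : String) : List String → Nat → List Nat
  | [], _ => []
  | x :: xs, i => if x == s then i :: pvPositions s xs (i + 1) else pvPositions s xs (i + 1)

-- each collected position is a genuine occurrence with exactly t earlier occurrences
theorem pvPositions_spec (s : String) : ∀ (m : List String) (d t : Nat),
    t < (pvPositions s m d).length →
    d ≤ (pvPositions s m d)[t]! ∧ (pvPositions s m d)[t]! - d < m.length ∧
    m[(pvPositions s m d)[t]! - d]! = s ∧
    List.count s (m.take ((pvPositions s m d)[t]! - d)) = t := by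
  intro m
  induction m with
  | nil => intro d t h; simp [pvPositions] at h
  | cons x xs ih =>
    intro d t h
    by_cases hx : x == s
    · have hxs : x = s := beq_iff_eq.mp hx
      subst hxs
      have hcons : pvPositions x (x :: xs) d = d :: pvPositions x xs (d + 1) := by
        simp [pvPositions]
      rw [hcons] at h ⊢
      cases t with
      | zero => simp
      | succ t' =>
        have h' : t' < (pvPositions x xs (d + 1)).length := by simpa using h
        obtain ⟨h1, h2, h3, h4⟩ := ih (d + 1) t' h'
        rw [List.getElem!_cons_succ]
        have hjd : (pvPositions x xs (d + 1))[t']! - d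
            = ((pvPositions x xs (d + 1))[t']! - (d + 1)) + 1 := by omega
        refine ⟨by omega, by simp only [List.length_cons]; omega, ?_, ?_⟩
        · rw [hjd, List.getElem!_cons_succ]; exact h3
        · rw [hjd, List.take_succ_cons, List.count_cons_self, h4]
    · have hne : x ≠ s := fun he => by simp [he] at hx
      have hcons : pvPositions s (x :: xs) d = pvPositions s xs (d + 1) := by
        simp [pvPositions, hx]
      rw [hcons] at h ⊢
      obtain ⟨h1, h2, h3, h4⟩ := ih (d + 1) t h
      have hjd : (pvPositions s xs (d + 1))[t]! - d
          = ((pvPositions s xs (d + 1))[t]! - (d + 1)) + 1 := by omega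
      refine ⟨by omega, by simp only [List.length_cons]; omega, ?_, ?_⟩
      · rw [hjd, List.getElem!_cons_succ]; exact h3
      · rw [hjd, List.take_succ_cons, List.count_cons_of_ne hne, h4]

-- length of the positions list = count, independent of the offset
theorem pvPositions_length (s : String) : ∀ (m : List String) (d : Nat),
    (pvPositions s m d).length = List.count s m := by
  intro m
  induction m with
  | nil => intro d; simp [pvPositions]
  | cons x xs ih =>
    intro d
    by_cases h : x == s
    · have hx : x = s := beq_iff_eq.mp h
      subst hx
      simp [pvPositions, ih]
    · have hne : ¬ (s = x) := fun he => by simp [he] at h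
      simp [pvPositions, h, ih, List.count_cons]

-- head of positions from d = index? offset by d
theorem pvPositions_head (s : String) : ∀ (m : List String) (d : Nat),
    (pvPositions s m d).head? = (PySem.List.index? m s).map (· + d) := by
  intro m
  induction m with
  | nil => intro d; simp [pvPositions, PySem.List.index?_eq_idxOf?]
  | cons x xs ih =>
    intro d
    by_cases h : x == s
    · have hx : x = s := beq_iff_eq.mp h
      subst hx
      rw [PySem.List.index?_cons_self]
      simp [pvPositions]
    · have hne : x ≠ s := fun he => by simp [he] at h
      rw [show pvPositions s (x :: xs) d = pvPositions s xs (d + 1) from by simp [pvPositions, h]]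
      rw [PySem.List.index?_cons_of_ne _ hne, ih (d + 1), Option.map_map]
      congr 1
      funext k
      simp; omega

-- tail structure: if the first position (from d) is p, the rest are the positions past p
theorem pvPositions_tail (s : String) : ∀ (m : List String) (d p : Nat) (rest : List Nat),
    pvPositions s m d = p :: rest →
    d ≤ p ∧ rest = pvPositions s (m.drop (p - d + 1)) (p + 1) := by
  intro m
  induction m with
  | nil => intro d p rest h; simp [pvPositions] at h
  | cons x xs ih =>
    intro d p rest h
    by_cases hx : x == s
    · simp [pvPositions, hx] at h
      obtain ⟨hp, hr⟩ := h
      subst hp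
      refine ⟨le_refl _, ?_⟩
      simp [hr]
    · simp [pvPositions, hx] at h
      obtain ⟨hle, hr⟩ := ih (d + 1) p rest h
      refine ⟨by omega, ?_⟩
      have he : p - d + 1 = (p - (d + 1) + 1) + 1 := by omega
      rw [he]
      simpa using hr

-- the while-loop collects exactly the positions from d onwards
theorem pvLoopA_eq (l : List String) (s : String) : ∀ (qs : List Nat) (d : Nat) (acc : List Int),
    pvPositions s (l.drop d) d = qs →
    pvLoopA l s qs.length (d : Int) acc = some (acc ++ qs.map Int.ofNat) := by
  intro qs
  induction qs with
  | nil => intro d acc h; simp [pvLoopA]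
  | cons p rest ih =>
    intro d acc h
    obtain ⟨hdp, hrest⟩ := pvPositions_tail s (l.drop d) d p rest h
    have hidx : pvIndexA l s (d : Int) = some (Int.ofNat p) := by
      have hh : (pvPositions s (l.drop d) d).head? = some p := by rw [h]; rfl
      rw [pvPositions_head] at hh
      unfold pvIndexA
      rw [Int.toNat_natCast]
      rcases ho : PySem.List.index? (l.drop d) s with _ | k
      · rw [ho] at hh; simp at hh
      · rw [ho] at hh
        simp at hh ⊢
        omega
    have hdrop : (l.drop d).drop (p - d + 1) = l.drop (p + 1) := by
      rw [List.drop_drop]; congr 1; omega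
    rw [hdrop] at hrest
    have hstep : pvLoopA l s (rest.length + 1) (d : Int) acc
        = pvLoopA l s rest.length (Int.ofNat p + 1) (acc ++ [Int.ofNat p]) := by
      show (match pvIndexA l s (d : Int) with
            | none => none
            | some i => pvLoopA l s rest.length (i + 1) (acc ++ [i])) = _
      rw [hidx]
    rw [List.length_cons, hstep]
    have hcast : Int.ofNat p + 1 = ((p + 1 : Nat) : Int) := by simp
    rw [hcast, ih (p + 1) (acc ++ [Int.ofNat p]) hrest.symm]
    simp

-- the pop loop succeeds whenever every index fits the shrinking list
theorem pvPopLoop_some : ∀ (rest : List Int) (cur : List String),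
    (∀ t (h : t < rest.length), 0 ≤ rest[t] ∧ rest[t] < (cur.length : Int) - t) →
    ∃ r, pvPopLoop cur rest = some r := by
  intro rest
  induction rest with
  | nil => intro cur _; exact ⟨cur, rfl⟩
  | cons i rs ih =>
    intro cur hcond
    have h0 := hcond 0 (by simp)
    simp at h0
    have hn : i.toNat < cur.length := by omega
    have hi : i = ((i.toNat : Nat) : Int) := by omega
    have hpop := PySem.List.pop?_natCast cur i.toNat hn
    rw [← hi] at hpop
    have hlen : (cur.eraseIdx i.toNat).length = cur.length - 1 := by
      rw [List.length_eraseIdx_of_lt hn]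
    obtain ⟨r, hr⟩ := ih (cur.eraseIdx i.toNat) (by
      intro t ht
      have h1 := hcond (t + 1) (by simpa using Nat.succ_lt_succ ht)
      simp at h1
      refine ⟨h1.1, ?_⟩
      rw [hlen]; omega)
    exact ⟨r, by simp [pvPopLoop, hpop, hr]⟩

-- B computes the head of the positions list
theorem pvFindB_eq (s : String) : ∀ (m : List String) (d : Nat),
    pvFindB s m (d : Int) = ((pvPositions s m d).head?).map Int.ofNat := by
  intro m
  induction m with
  | nil => intro d; simp [pvFindB, pvPositions]
  | cons x xs ih =>
    intro d
    by_cases h : x == s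
    · simp [pvFindB, pvPositions, h]
    · have hcast : (d : Int) + 1 = ((d + 1 : Nat) : Int) := by push_cast; ring
      rw [show pvFindB s (x :: xs) (d : Int) = if x == s then some (d : Int) else pvFindB s xs ((d : Int) + 1) from rfl]
      rw [if_neg (by simp [h]), hcast, ih (d + 1)]
      simp [pvPositions, h]

-- ===== VERDICT (by name: the statement is the Claim_ definition above) =====
theorem HeaderIndex_spec : Claim_equal_HeaderIndex := by
  intro s l _ hpre
  unfold Spec_HeaderIndex HeaderIndex HeaderIndex_alt
  have hfind := pvFindB_eq s l 0
  simp only [Nat.cast_zero] at hfind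
  have hcount : PySem.List.count l s = (pvPositions s l 0).length := by
    rw [PySem.List.count_eq, pvPositions_length s l 0]
  rcases hps : pvPositions s l 0 with _ | ⟨p, rest⟩
  · -- no occurrence: count = 0, both none
    rw [hps] at hcount
    simp only [hcount, List.length_nil, reduceIte]
    rw [hfind, hps]
    rfl
  · -- first occurrence p
    have hloop := pvLoopA_eq l s (pvPositions s l 0) 0 [] (by simp)
    simp only [Nat.cast_zero] at hloop
    rw [hps] at hloop hcount
    simp only [List.length_cons, List.nil_append, List.map_cons] at hloop
    rw [hcount]
    simp only [List.length_cons]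
    rw [if_neg (by simp)]
    -- pops succeed under Pre_
    have hpop : ∃ r, pvPopLoop l (rest.map Int.ofNat) = some r := by
      apply pvPopLoop_some
      intro t ht
      have ht' : t < rest.length := by simpa using ht
      have htlt : t + 1 < (pvPositions s l 0).length := by
        rw [hps]; simpa using Nat.succ_lt_succ ht'
      obtain ⟨_, hjlt, hjs, hjcount⟩ := pvPositions_spec s l 0 (t + 1) htlt
      rw [hps] at hjlt hjs hjcount
      simp only [Nat.sub_zero] at hjlt hjs hjcount
      have hget : (p :: rest)[t + 1]! = rest[t]'ht' := by
        rw [getElem!_pos (p :: rest) (t + 1) (by simpa using Nat.succ_lt_succ ht')]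
        simp
      rw [hget] at hjlt hjs hjcount
      have hpre' : rest[t]'ht' + (t + 1) ≤ l.length := by
        have h5 := hpre (rest[t]'ht') hjlt hjs (by omega)
        omega
      have hg : (rest.map Int.ofNat)[t]'ht = Int.ofNat (rest[t]'ht') := by
        simp
      rw [hg]
      constructor
      · simp
      · simp only [Int.ofNat_eq_natCast]; omega
    obtain ⟨r, hr⟩ := hpop
    simp only [hloop, hr, hfind, hps, List.head?_cons, Option.map_some]

@[simp] theorem HeaderIndex_raises : Claim_raises_HeaderIndex := by
  unfold Claim_raises_HeaderIndex
  constructor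
  · intro s l _ hR hpre
    obtain ⟨j, h1, h2, h3, h4⟩ := hR
    exact absurd (hpre j h1 h2 h3) (by omega)
  · refine ⟨by decide, by decide, by decide⟩
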